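-- pv_equiv track=rewrite | github.com/jiaola/usaco | guide/hopscotch/hopscotch.py | find
-- ===== SOURCE A (Python) =====
-- def find(color, b, i, j, r, c, total):
--     if i == r-1 and j == c-1:
--         return total + 1
--     elif i == r-1 or j == c-1:
--         return total
--     else:
--         for x in range(i+1, r):         #  R R R R
--             for y in range(j+1, c):     #  R B R R
--                 if b[x][y] != color:    #  R B R R
--                     total = find(b[x][y], b, x, y, r, c, total)
--         return total
-- ===== SOURCE B (Python) =====
-- def find(color, b, i, j, r, c, total):
--     if i == r - 1 and j == c - 1:
--         return total + 1
--     if i == r - 1 or j == c - 1: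
--         return total
--     # bottom-up DP: paths[(x, y)] = number of colour-changing paths from cell
--     # (x, y) (coloured b[x][y]) to the bottom-right corner
--     paths = {}
--     for x in range(r - 1, i, -1):
--         for y in range(c - 1, j, -1):
--             if x == r - 1 and y == c - 1:
--                 paths[(x, y)] = 1
--             elif x == r - 1 or y == c - 1:
--                 paths[(x, y)] = 0
--             else:
--                 paths[(x, y)] = sum(paths[(u, v)]
--                                     for u in range(x + 1, r)
--                                     for v in range(y + 1, c)
--                                     if b[u][v] != b[x][y])
--     return total + sum(paths[(u, v)]
--                        for u in range(i + 1, r)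
--                        for v in range(j + 1, c)
--                        if b[u][v] != color)
-- ===== Notes on version B (the rewrite author's own statement) =====
-- stated objective: alternative
-- what changed: Replaces A's top-down recursion (which re-solves reachable cells repeatedly) by a bottom-up dynamic-programming table that computes the path count of each cell exactly once.
import Mathlib
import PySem

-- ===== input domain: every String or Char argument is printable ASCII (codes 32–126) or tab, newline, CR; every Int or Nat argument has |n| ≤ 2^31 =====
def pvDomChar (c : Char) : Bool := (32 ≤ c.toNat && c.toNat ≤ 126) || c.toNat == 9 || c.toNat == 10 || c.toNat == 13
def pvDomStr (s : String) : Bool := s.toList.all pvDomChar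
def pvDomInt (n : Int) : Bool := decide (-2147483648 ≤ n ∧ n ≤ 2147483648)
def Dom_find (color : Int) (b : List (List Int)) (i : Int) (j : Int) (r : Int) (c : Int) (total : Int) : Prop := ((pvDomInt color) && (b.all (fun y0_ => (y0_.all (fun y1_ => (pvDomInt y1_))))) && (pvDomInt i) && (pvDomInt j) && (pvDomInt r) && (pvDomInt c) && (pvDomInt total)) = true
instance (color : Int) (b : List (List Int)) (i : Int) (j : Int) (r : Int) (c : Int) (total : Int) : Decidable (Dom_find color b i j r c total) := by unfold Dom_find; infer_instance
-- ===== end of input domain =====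

-- B replaces A's top-down recursion by a bottom-up dynamic-programming table
-- (one path count per cell, computed once); objective: alternative algorithm.

-- b[x][y] with Python's negative-index wraparound (exact under Pre_, which puts every
-- accessed index in Python's accepted range)
def bg (b : List (List Int)) (x y : Int) : Int :=
  PySem.List.pyGetD (PySem.List.pyGetD b x []) y 0

-- ===== PORT A =====
-- A's recursion, with a fuel argument that `find` seeds with (r - i).toNat + 1 — always
-- enough, since every recursive call strictly increases i towards r (fuel 0 is unreachable).
def findFuel (b : List (List Int)) (r c : Int) : Nat → Int → Int → Int → Int → Int
  | 0, _, _, _, total => total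
  | fuel+1, color, i, j, total =>
    if i = r - 1 ∧ j = c - 1 then total + 1
    else if i = r - 1 ∨ j = c - 1 then total
    else
      (PySem.List.pyRange (i+1) r 1).foldl
        (fun t x =>
          (PySem.List.pyRange (j+1) c 1).foldl
            (fun t y => if bg b x y ≠ color then findFuel b r c fuel (bg b x y) x y t else t)
            t)
        total

def find (color : Int) (b : List (List Int)) (i : Int) (j : Int) (r : Int) (c : Int) (total : Int) : Int :=
  findFuel b r c ((r - i).toNat + 1) color i j total

-- ===== PORT B =====
-- value stored for cell (x, y): paths[(x,y)] of Source B
def cellVal (b : List (List Int)) (r c : Int) (d : PySem.Dict (Int × Int) Int) (x y : Int) : Int :=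
  if x = r - 1 ∧ y = c - 1 then 1
  else if x = r - 1 ∨ y = c - 1 then 0
  else
    ((PySem.List.pyRange (x+1) r 1).map (fun u =>
      ((PySem.List.pyRange (y+1) c 1).map (fun v =>
        if bg b u v ≠ bg b x y then d.getD (u, v) 0 else 0)).sum)).sum

-- inner loop 'for y in range(c-1, j, -1)'
def rowStep (b : List (List Int)) (r c : Int) (x : Int) (d : PySem.Dict (Int × Int) Int) (y : Int) : PySem.Dict (Int × Int) Int :=
  d.insert (x, y) (cellVal b r c d x y)

-- outer loop body for one x
def tableStep (b : List (List Int)) (r c j : Int) (d : PySem.Dict (Int × Int) Int) (x : Int) : PySem.Dict (Int × Int) Int :=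
  (PySem.List.pyRange (c-1) j (-1)).foldl (rowStep b r c x) d

-- 'paths = {}; for x in range(r-1, i, -1): …'
def buildTable (b : List (List Int)) (r c i j : Int) : PySem.Dict (Int × Int) Int :=
  (PySem.List.pyRange (r-1) i (-1)).foldl (tableStep b r c j) PySem.Dict.empty

def find_alt (color : Int) (b : List (List Int)) (i : Int) (j : Int) (r : Int) (c : Int) (total : Int) : Int :=
  if i = r - 1 ∧ j = c - 1 then total + 1
  else if i = r - 1 ∨ j = c - 1 then total
  else
    let paths := buildTable b r c i j
    total + ((PySem.List.pyRange (i+1) r 1).map (fun u =>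
      ((PySem.List.pyRange (j+1) c 1).map (fun v =>
        if bg b u v ≠ color then paths.getD (u, v) 0 else 0)).sum)).sum

-- ===== PRECONDITION & SPEC =====
-- Pre_ excludes exactly the inputs on which Python A raises IndexError: when both loop
-- ranges are non-empty, A reads b[x][y] for every x in (i, r) and y in (j, c), so the whole
-- interval (i, r) must be in Python's accepted (possibly negative) index range of b, and
-- every row of b reached by such an x (directly, or by negative-index wraparound) must
-- accept every y in (j, c).
def Pre_find (color : Int) (b : List (List Int)) (i : Int) (j : Int) (r : Int) (c : Int) (total : Int) : Prop :=
  r - 1 ≤ i ∨ c - 1 ≤ j ∨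
    (-(b.length : Int) ≤ i + 1 ∧ r ≤ (b.length : Int) ∧
      ∀ p ∈ b.zipIdx,
        ((i + 1 ≤ (p.2 : Int) ∧ (p.2 : Int) < r) ∨
         (i + 1 ≤ (p.2 : Int) - (b.length : Int) ∧ (p.2 : Int) - (b.length : Int) < r)) →
        (-(p.1.length : Int) ≤ j + 1 ∧ c ≤ (p.1.length : Int)))
instance (color : Int) (b : List (List Int)) (i : Int) (j : Int) (r : Int) (c : Int) (total : Int) : Decidable (Pre_find color b i j r c total) := by unfold Pre_find; infer_instance

def pvWitness_find : Int × List (List Int) × Int × Int × Int × Int × Int :=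
  (1, [[1, 2], [3, 1]], 0, 0, 2, 2, 0)

def Spec_find (color : Int) (b : List (List Int)) (i : Int) (j : Int) (r : Int) (c : Int) (total : Int) (out : Int) : Prop := out = find_alt color b i j r c total
instance (color : Int) (b : List (List Int)) (i : Int) (j : Int) (r : Int) (c : Int) (total : Int) (out : Int) : Decidable (Spec_find color b i j r c total out) := by unfold Spec_find; infer_instance

-- ===== CLAIM (what is proved, stated in full; the proofs are below) =====
def Claim_equal_find : Prop := ∀ (color : Int) (b : List (List Int)) (i : Int) (j : Int) (r : Int) (c : Int) (total : Int), Dom_find color b i j r c total → Pre_find color b i j r c total → Spec_find color b i j r c total (find color b i j r c total)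

-- ===== LEMMAS AND PROOFS =====

-- the meaning of a table cell: paths from (x, y) with colour b[x][y], i.e. A's recursion at
-- (x, y) with accumulator 0 and enough fuel
def Nv (b : List (List Int)) (r c x y : Int) : Int :=
  findFuel b r c ((r - x).toNat + 1) (bg b x y) x y 0

-- the double sum both programs compute in the non-border case
def Ssum (b : List (List Int)) (r c color i j : Int) : Int :=
  ((PySem.List.pyRange (i+1) r 1).map (fun x =>
    ((PySem.List.pyRange (j+1) c 1).map (fun y =>
      if bg b x y ≠ color then Nv b r c x y else 0)).sum)).sum

theorem pvFoldlShift {α : Type} (f : Int → α → Int) (h : ∀ t x, f t x = t + f 0 x) :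
    ∀ (l : List α) (t : Int), l.foldl f t = t + l.foldl f 0 := by
  intro l
  induction l with
  | nil => intro t; simp
  | cons x xs ih =>
    intro t
    simp only [List.foldl_cons]
    rw [ih (f t x), h t x, ih (f 0 x)]
    ring

theorem findFuel_add (b : List (List Int)) (r c : Int) :
    ∀ (fuel : Nat) (color i j t : Int),
      findFuel b r c fuel color i j t = t + findFuel b r c fuel color i j 0 := by
  intro fuel
  induction fuel with
  | zero => intro color i j t; simp [findFuel]
  | succ fuel ih =>
    intro color i j t
    simp only [findFuel]
    split_ifs with h1 h2
    · omega
    · omega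
    · apply pvFoldlShift
      intro t' x
      apply pvFoldlShift
      intro t'' y
      by_cases hb : bg b x y ≠ color
      · rw [if_pos hb, if_pos hb]
        exact ih (bg b x y) x y t''
      · rw [if_neg hb, if_neg hb]; omega

theorem findFuel_stable (b : List (List Int)) (r c : Int) :
    ∀ (f1 f2 : Nat) (color i j t : Int), (r - i).toNat < f1 → (r - i).toNat < f2 →
      findFuel b r c f1 color i j t = findFuel b r c f2 color i j t := by
  intro f1
  induction f1 with
  | zero => intro f2 color i j t h1 _; omega
  | succ f1 ih =>
    intro f2 color i j t h1 h2
    cases f2 with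
    | zero => omega
    | succ f2 =>
      simp only [findFuel]
      split_ifs with hA hB
      · rfl
      · rfl
      · apply PySem.List.foldl_congr_mem
        intro acc x hx
        apply PySem.List.foldl_congr_mem
        intro acc2 y _
        have hx' := (PySem.List.mem_pyRange_one).1 hx
        by_cases hb : bg b x y ≠ color
        · rw [if_pos hb, if_pos hb]
          exact ih f2 (bg b x y) x y acc2 (by omega) (by omega)
        · rw [if_neg hb, if_neg hb]

theorem findFuel_eval (b : List (List Int)) (r c : Int) (fuel : Nat) (color i j : Int)
    (h : (r - i).toNat < fuel) :
    findFuel b r c fuel color i j 0 =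
      if i = r - 1 ∧ j = c - 1 then 1
      else if i = r - 1 ∨ j = c - 1 then 0
      else Ssum b r c color i j := by
  cases fuel with
  | zero => omega
  | succ fuel =>
    simp only [findFuel]
    split_ifs with h1 h2
    · rfl
    · rfl
    · have houter : ∀ acc (x : Int), x ∈ PySem.List.pyRange (i+1) r 1 →
          ((PySem.List.pyRange (j+1) c 1).foldl
            (fun t y => if bg b x y ≠ color then findFuel b r c fuel (bg b x y) x y t else t) acc)
          = acc + ((PySem.List.pyRange (j+1) c 1).map
              (fun y => if bg b x y ≠ color then Nv b r c x y else 0)).sum := by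
        intro acc x hx
        have hx' := (PySem.List.mem_pyRange_one).1 hx
        rw [PySem.List.foldl_congr_mem
              (g := fun t y => t + (if bg b x y ≠ color then Nv b r c x y else 0))]
        · exact PySem.List.foldl_add _ _ _
        · intro acc2 y _
          by_cases hb : bg b x y ≠ color
          · rw [if_pos hb, if_pos hb, findFuel_add]
            have : findFuel b r c fuel (bg b x y) x y 0 = Nv b r c x y := by
              unfold Nv
              exact findFuel_stable b r c fuel _ (bg b x y) x y 0 (by omega) (by omega)
            rw [this]
          · rw [if_neg hb, if_neg hb]; omega
      rw [PySem.List.foldl_congr_mem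
            (g := fun t x => t + ((PySem.List.pyRange (j+1) c 1).map
              (fun y => if bg b x y ≠ color then Nv b r c x y else 0)).sum)]
      · rw [PySem.List.foldl_add]
        simp [Ssum]
      · intro acc x hx
        exact houter acc x hx

-- invariant of B's table-building loops: every cell strictly below row X, and every cell of
-- row X strictly right of column Y (within the rectangle (i,r) × (j,c)), holds its Nv value
def GoodD (b : List (List Int)) (r c j : Int) (d : PySem.Dict (Int × Int) Int) (X Y : Int) : Prop :=
  ∀ u v : Int, j < v → v < c → u < r → (X < u ∨ (u = X ∧ Y < v)) →
    d.getD (u, v) 0 = Nv b r c u v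

theorem cellVal_eq (b : List (List Int)) (r c j : Int) (d : PySem.Dict (Int × Int) Int)
    (X Y : Int) (hY : j < Y) (hd : GoodD b r c j d X Y) :
    cellVal b r c d X Y = Nv b r c X Y := by
  unfold Nv
  rw [findFuel_eval b r c _ _ X Y (by omega)]
  unfold cellVal
  split_ifs with h1 h2
  · rfl
  · rfl
  · unfold Ssum
    apply congrArg List.sum
    apply List.map_congr_left
    intro u hu
    apply congrArg List.sum
    apply List.map_congr_left
    intro v hv
    have hu' := (PySem.List.mem_pyRange_one).1 hu
    have hv' := (PySem.List.mem_pyRange_one).1 hv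
    by_cases hb : bg b u v ≠ bg b X Y
    · rw [if_pos hb, if_pos hb]
      exact hd u v (by omega) (by omega) (by omega) (by omega)
    · rw [if_neg hb, if_neg hb]

theorem innerGood (b : List (List Int)) (r c j X : Int) :
    ∀ (n : Nat) (Y : Int) (d : PySem.Dict (Int × Int) Int), (Y - j).toNat = n →
      GoodD b r c j d X Y →
      GoodD b r c j ((PySem.List.pyRange Y j (-1)).foldl (rowStep b r c X) d) X j := by
  intro n
  induction n with
  | zero =>
    intro Y d hn hd
    rw [PySem.List.pyRange_neg_one_eq_nil (by omega)]
    intro u v hjv hvc hur hcase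
    exact hd u v hjv hvc hur (by omega)
  | succ n ih =>
    intro Y d hn hd
    rw [PySem.List.pyRange_neg_one_cons (by omega)]
    simp only [List.foldl_cons]
    apply ih (Y - 1) _ (by omega)
    -- GoodD after inserting (X, Y)
    intro u v hjv hvc hur hcase
    unfold rowStep
    by_cases hk : (u, v) = ((X : Int), (Y : Int))
    · have hu : u = X := by exact congrArg Prod.fst hk
      have hv : v = Y := by exact congrArg Prod.snd hk
      rw [hk, PySem.Dict.getD_insert, if_pos rfl, hu, hv] at *
      exact cellVal_eq b r c j d X Y (by omega) hd
    · rw [PySem.Dict.getD_insert, if_neg hk]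
      apply hd u v hjv hvc hur
      rcases hcase with h | ⟨hux, hYv⟩
      · exact Or.inl h
      · right
        refine ⟨hux, ?_⟩
        by_cases hvY : v = Y
        · exact absurd (by rw [hux, hvY]) hk
        · omega

theorem outerGood (b : List (List Int)) (r c i j : Int) :
    ∀ (n : Nat) (X : Int) (d : PySem.Dict (Int × Int) Int), (X - i).toNat = n →
      GoodD b r c j d X c →
      GoodD b r c j ((PySem.List.pyRange X i (-1)).foldl (tableStep b r c j) d) i c := by
  intro n
  induction n with
  | zero =>
    intro X d hn hd
    rw [PySem.List.pyRange_neg_one_eq_nil (by omega)]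
    intro u v hjv hvc hur hcase
    exact hd u v hjv hvc hur (by omega)
  | succ n ih =>
    intro X d hn hd
    rw [PySem.List.pyRange_neg_one_cons (by omega)]
    simp only [List.foldl_cons]
    apply ih (X - 1) _ (by omega)
    -- after processing row X we have GoodD _ X j, which implies GoodD _ (X-1) c
    have hstep : GoodD b r c j (tableStep b r c j d X) X j := by
      unfold tableStep
      apply innerGood b r c j X ((c - 1) - j).toNat (c - 1) d rfl
      intro u v hjv hvc hur hcase
      exact hd u v hjv hvc hur (by omega)
    intro u v hjv hvc hur hcase
    exact hstep u v hjv hvc hur (by omega)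

theorem buildTable_good (b : List (List Int)) (r c i j : Int) :
    GoodD b r c j (buildTable b r c i j) i c := by
  unfold buildTable
  apply outerGood b r c i j ((r - 1) - i).toNat (r - 1) PySem.Dict.empty rfl
  intro u v _ _ hur hcase
  omega

-- ===== VERDICT (by name: the statement is the Claim_ definition above) =====
theorem find_spec : Claim_equal_find := by
  intro color b i j r c total _ _
  unfold Spec_find find find_alt
  rw [findFuel_add, findFuel_eval b r c _ color i j (by omega)]
  split_ifs with h1 h2
  · rfl
  · omega
  · have hgood := buildTable_good b r c i j
    apply congrArg (total + ·)
    symm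
    apply congrArg List.sum
    apply List.map_congr_left
    intro u hu
    apply congrArg List.sum
    apply List.map_congr_left
    intro v hv
    have hu' := (PySem.List.mem_pyRange_one).1 hu
    have hv' := (PySem.List.mem_pyRange_one).1 hv
    by_cases hb : bg b u v ≠ color
    · rw [if_pos hb, if_pos hb]
      exact hgood u v (by omega) (by omega) (by omega) (by omega)
    · rw [if_neg hb, if_neg hb]
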